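-- pv_equiv track=rewrite | github.com/J-Henriksson/Leetcode-solutions | Easy/python/final_array_state.py | get_final_state_heap
-- ===== SOURCE A (Python) =====
-- from typing import List
-- import heapq
--
-- def get_final_state_heap(nums: List[int], k: int, multiplier: int) -> List[int]:
--     nums_heap = []
--     for i in range(len(nums)):
--         heapq.heappush(nums_heap, (nums[i], i))
--
--     for _ in range(k):
--         value, index = nums_heap[0]
--         value *= multiplier
--         heapq.heapreplace(nums_heap, (value, index))
--         nums[index] = value
--     return nums
-- ===== SOURCE B (Python) =====
-- from typing import List
--
--
-- def get_final_state_heap(nums: List[int], k: int, multiplier: int) -> List[int]: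
--     # Heap-free: each round, scan for the first occurrence of the minimum
--     # and multiply it in place. Same result, no heap bookkeeping.
--     for _ in range(k):
--         m = min(nums)
--         i = nums.index(m)
--         nums[i] = m * multiplier
--     return nums
-- ===== Notes on version B (the rewrite author's own statement) =====
-- stated objective: simpler
-- what changed: Replaced the binary-heap simulation (heappush/heapreplace with (value,index) pairs) by a plain loop that each round finds the first occurrence of the minimum with min()/index() and multiplies it in place; no heap, no index pairs.
import Mathlib
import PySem

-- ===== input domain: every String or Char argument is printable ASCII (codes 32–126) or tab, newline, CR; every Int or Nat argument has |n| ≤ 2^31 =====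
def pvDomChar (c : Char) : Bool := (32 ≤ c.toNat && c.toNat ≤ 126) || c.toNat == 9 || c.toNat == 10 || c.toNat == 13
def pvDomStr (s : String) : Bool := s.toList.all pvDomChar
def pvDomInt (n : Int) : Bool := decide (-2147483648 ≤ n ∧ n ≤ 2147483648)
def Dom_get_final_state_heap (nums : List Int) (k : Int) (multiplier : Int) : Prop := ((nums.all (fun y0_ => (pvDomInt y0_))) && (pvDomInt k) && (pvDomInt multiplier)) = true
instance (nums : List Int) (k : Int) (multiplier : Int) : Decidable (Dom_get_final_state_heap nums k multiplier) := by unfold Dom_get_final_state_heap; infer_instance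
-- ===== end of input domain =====

-- B replaces A's binary-heap simulation by a per-round first-minimum scan (simpler, no heap).
-- Both Pythons mutate `nums` in place; the equivalence proved here is about the return value.

-- ===== PORT A =====
-- Python's tuple comparison (value, index) < (value, index): lexicographic.
def pvPlt (a b : Int × Int) : Bool := a.1 < b.1 || (a.1 == b.1 && a.2 < b.2)

-- the while-loop of heapq._siftdown(heap, startpos, pos), with newitem = heap[pos] already read
def pvSiftdownLoop (heap : List (Int × Int)) (startpos pos : Nat) (newitem : Int × Int) :
    List (Int × Int) :=
  if _h : startpos < pos then
    let parentpos := (pos - 1) / 2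
    let parent := heap.getD parentpos (0, 0)
    if pvPlt newitem parent then
      pvSiftdownLoop (heap.set pos parent) startpos parentpos newitem
    else
      heap.set pos newitem
  else
    heap.set pos newitem
termination_by pos
decreasing_by omega

-- heapq._siftdown: newitem = heap[pos] (pos is in range at every call site, so getD is exact)
def pvSiftdown (heap : List (Int × Int)) (startpos pos : Nat) : List (Int × Int) :=
  pvSiftdownLoop heap startpos pos (heap.getD pos (0, 0))

-- heapq.heappush: append, then sift the new last slot towards the root
def pvHeappush (heap : List (Int × Int)) (item : Int × Int) : List (Int × Int) :=
  let h := heap ++ [item]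
  pvSiftdown h 0 (h.length - 1)

-- the while-loop of heapq._siftup; returns the heap and the final pos
def pvSiftupLoop (heap : List (Int × Int)) (pos childpos endpos : Nat) (newitem : Int × Int) :
    List (Int × Int) × Nat :=
  if _h : childpos < endpos then
    let rightpos := childpos + 1
    let childpos' := if rightpos < endpos &&
        !pvPlt (heap.getD childpos (0, 0)) (heap.getD rightpos (0, 0)) then rightpos else childpos
    let heap' := heap.set pos (heap.getD childpos' (0, 0))
    pvSiftupLoop heap' childpos' (2 * childpos' + 1) endpos newitem
  else
    (heap.set pos newitem, pos)
termination_by endpos - childpos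
decreasing_by split <;> omega

-- heapq._siftup(heap, pos): newitem = heap[pos] (in range at every call site)
def pvSiftup (heap : List (Int × Int)) (pos : Nat) : List (Int × Int) :=
  let endpos := heap.length
  let startpos := pos
  let newitem := heap.getD pos (0, 0)
  let r := pvSiftupLoop heap pos (2 * pos + 1) endpos newitem
  pvSiftdown r.1 startpos r.2

-- heapq.heapreplace (its popped return value is unused by A)
def pvHeapreplace (heap : List (Int × Int)) (item : Int × Int) : List (Int × Int) :=
  pvSiftup (heap.set 0 item) 0

-- 'for i in range(len(nums)): heapq.heappush(nums_heap, (nums[i], i))'; nums[i] with 0 ≤ i < len is exact as getD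
def pvBuild (nums : List Int) : List (Int × Int) :=
  (List.range nums.length).foldl (fun h i => pvHeappush h (nums.getD i 0, (i : Int))) []

-- 'for _ in range(k)': value, index = nums_heap[0]; value *= multiplier; heapreplace; nums[index] = value.
-- nums_heap[0] of an empty heap is Python's IndexError — excluded by Pre_ below;
-- index is always a valid index of nums, so 'nums[index] = value' is exactly nums.set index.toNat value.
def pvLoopA (multiplier : Int) : Nat → List Int × List (Int × Int) → List Int × List (Int × Int)
  | 0, st => st
  | fuel + 1, (nums, heap) =>
    let vi := heap.getD 0 (0, 0)
    let value := vi.1 * multiplier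
    let heap' := pvHeapreplace heap (value, vi.2)
    let nums' := nums.set vi.2.toNat value
    pvLoopA multiplier fuel (nums', heap')

def get_final_state_heap (nums : List Int) (k : Int) (multiplier : Int) : List Int :=
  (pvLoopA multiplier k.toNat (nums, pvBuild nums)).1

-- ===== PORT B =====
-- 'for _ in range(k): m = min(nums); i = nums.index(m); nums[i] = m * multiplier'
-- min([]) is Python's ValueError — excluded by Pre_ below; i is always a valid index (m ∈ nums).
def pvLoopB (multiplier : Int) : Nat → List Int → List Int
  | 0, nums => nums
  | fuel + 1, nums =>
    let m := (PySem.List.min? nums (fun x => x)).getD 0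
    let i := (PySem.List.index? nums m).getD 0
    pvLoopB multiplier fuel (nums.set i (m * multiplier))

def get_final_state_heap_alt (nums : List Int) (k : Int) (multiplier : Int) : List Int :=
  pvLoopB multiplier k.toNat nums

-- ===== PRECONDITION & SPEC =====
-- Pre_ excludes exactly nums = [] with k > 0: there A raises IndexError (nums_heap[0])
-- and B raises ValueError (min([])); on everything else both return normally.
def Pre_get_final_state_heap (nums : List Int) (k : Int) (multiplier : Int) : Prop :=
  nums ≠ [] ∨ k ≤ 0

instance (nums : List Int) (k : Int) (multiplier : Int) :
    Decidable (Pre_get_final_state_heap nums k multiplier) := by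
  unfold Pre_get_final_state_heap; infer_instance

def pvWitness_get_final_state_heap : List Int × Int × Int := ([2, 1, 3, 1], 5, 2)

def Spec_get_final_state_heap (nums : List Int) (k : Int) (multiplier : Int) (out : List Int) : Prop := out = get_final_state_heap_alt nums k multiplier
instance (nums : List Int) (k : Int) (multiplier : Int) (out : List Int) : Decidable (Spec_get_final_state_heap nums k multiplier out) := by unfold Spec_get_final_state_heap; infer_instance

-- ===== CLAIM (what is proved, stated in full; the proofs are below) =====
def Claim_equal_get_final_state_heap : Prop := ∀ (nums : List Int) (k : Int) (multiplier : Int), Dom_get_final_state_heap nums k multiplier → Pre_get_final_state_heap nums k multiplier → Spec_get_final_state_heap nums k multiplier (get_final_state_heap nums k multiplier)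

-- ===== LEMMAS AND PROOFS =====

theorem pvPlt_iff (a b : Int × Int) :
    pvPlt a b = true ↔ (a.1 < b.1 ∨ (a.1 = b.1 ∧ a.2 < b.2)) := by
  cases a; cases b; simp [pvPlt]

theorem pvPlt_false_iff (a b : Int × Int) :
    pvPlt a b = false ↔ (b.1 < a.1 ∨ (b.1 = a.1 ∧ b.2 ≤ a.2)) := by
  rw [← Bool.not_eq_true, pvPlt_iff]; cases a; cases b; constructor <;> (intro h; dsimp at *; omega)

theorem pvPlt_irrefl (a : Int × Int) : pvPlt a a = false := by
  rw [pvPlt_false_iff]; omega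

theorem pvPle_trans {a b c : Int × Int} (h1 : pvPlt b a = false) (h2 : pvPlt c b = false) :
    pvPlt c a = false := by
  rw [pvPlt_false_iff] at *; omega

theorem pvPle_antisymm {a b : Int × Int} (h1 : pvPlt a b = false) (h2 : pvPlt b a = false) :
    a = b := by
  rw [pvPlt_false_iff] at *; cases a; cases b; simp at *; omega

theorem pvPlt_to_ple {a b : Int × Int} (h : pvPlt a b = true) : pvPlt b a = false := by
  rw [pvPlt_iff] at h; rw [pvPlt_false_iff]; omega

theorem pvGetD_set (l : List (Int × Int)) (p q : Nat) (x d : Int × Int) :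
    (l.set p x).getD q d = if p = q ∧ p < l.length then x else l.getD q d := by
  simp only [List.getD_eq_getElem?_getD, List.getElem?_set]
  by_cases h1 : p = q
  · subst h1
    by_cases h2 : p < l.length
    · simp [h2]
    · simp [h2]
  · simp [h1]

theorem pvGetD_set1 (l : List (Int × Int)) (p r : Nat) (x : Int × Int) (hpl : p < l.length) :
    (l.set p x).getD r (0, 0) = if p = r then x else l.getD r (0, 0) := by
  rw [pvGetD_set]; simp [hpl]

theorem pvGetD_set2 (l : List (Int × Int)) (p q r : Nat) (x y : Int × Int)
    (hpl : p < l.length) (hql : q < l.length) :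
    ((l.set p x).set q y).getD r (0, 0)
      = if q = r then y else if p = r then x else l.getD r (0, 0) := by
  rw [pvGetD_set, pvGetD_set]
  simp [List.length_set, hpl, hql]

theorem pvCount_set (l : List (Int × Int)) (p : Nat) (x y : Int × Int) (hp : p < l.length) :
    (l.set p x).count y + (if l.getD p (0, 0) = y then 1 else 0)
      = l.count y + (if x = y then 1 else 0) := by
  induction l generalizing p with
  | nil => simp at hp
  | cons a t ih =>
    cases p with
    | zero => simp [List.count_cons]; split_ifs <;> simp_all
    | succ n =>
      simp only [List.set_cons_succ, List.count_cons, List.getD_cons_succ]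
      have := ih n (by simpa using Nat.lt_of_succ_lt_succ hp)
      split_ifs at this ⊢ <;> omega

theorem pvSet_getD_self (l : List (Int × Int)) (p : Nat) (hp : p < l.length) :
    l.set p (l.getD p (0, 0)) = l := by
  rw [List.getD_eq_getElem l _ hp, List.set_getElem_self]

def PvHeap (l : List (Int × Int)) : Prop :=
  ∀ j, 0 < j → j < l.length → pvPlt (l.getD j (0, 0)) (l.getD ((j - 1) / 2) (0, 0)) = false

theorem pvHeap_root_min {l : List (Int × Int)} (h : PvHeap l) :
    ∀ j, j < l.length → pvPlt (l.getD j (0, 0)) (l.getD 0 (0, 0)) = false := by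
  intro j
  induction j using Nat.strong_induction_on with
  | _ j ih =>
    intro hj
    rcases Nat.eq_zero_or_pos j with h0 | hpos
    · subst h0; exact pvPlt_irrefl _
    · exact pvPle_trans (ih ((j - 1) / 2) (by omega) (by omega)) (h j hpos hj)

theorem pvSiftdownLoop_length (heap : List (Int × Int)) (s p : Nat) (x : Int × Int) :
    (pvSiftdownLoop heap s p x).length = heap.length := by
  fun_induction pvSiftdownLoop heap s p x <;> simp_all

theorem pvSiftdownLoop_count (heap : List (Int × Int)) (s p : Nat) (x y : Int × Int) :
    p < heap.length →
    (pvSiftdownLoop heap s p x).count y + (if heap.getD p (0, 0) = y then 1 else 0)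
      = heap.count y + (if x = y then 1 else 0) := by
  fun_induction pvSiftdownLoop heap s p x with
  | case1 heap pos hsp pp par hlt ih =>
    intro hp
    have hppdef : pp = (pos - 1) / 2 := rfl
    have hpardef : par = heap.getD pp (0, 0) := rfl
    have hppl : pp < heap.length := by omega
    have h1 := ih (by simpa using hppl)
    have h2 := pvCount_set heap pos par y hp
    rw [pvGetD_set1 _ _ _ _ hp, if_neg (by omega : ¬ pos = pp), ← hpardef] at h1
    split_ifs at h1 h2 ⊢ <;> omega
  | case2 heap pos hsp pp par hlt =>
    intro hp; exact pvCount_set heap pos x y hp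
  | case3 heap pos hsp =>
    intro hp; exact pvCount_set heap pos x y hp

theorem pvSiftdownLoop_heap (heap : List (Int × Int)) (s p : Nat) (x : Int × Int) :
    s = 0 → p < heap.length →
    (∀ j, 0 < j → j < heap.length → j ≠ p →
      pvPlt ((heap.set p x).getD j (0, 0)) ((heap.set p x).getD ((j - 1) / 2) (0, 0)) = false) →
    (∀ j, 0 < j → j < heap.length → (j - 1) / 2 = p → 0 < p →
      pvPlt (heap.getD j (0, 0)) (heap.getD ((p - 1) / 2) (0, 0)) = false) →
    PvHeap (pvSiftdownLoop heap s p x) := by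
  fun_induction pvSiftdownLoop heap s p x with
  | case1 heap pos hsp pp par hlt ih =>
    intro hs hp hInv hI2
    subst hs
    have hppdef : pp = (pos - 1) / 2 := rfl
    have hpardef : par = heap.getD pp (0, 0) := rfl
    have hpos0 : 0 < pos := hsp
    have hppl : pp < heap.length := by omega
    have hInv' : ∀ j, 0 < j → j < heap.length → j ≠ pos →
        pvPlt (if pos = j then x else heap.getD j (0, 0))
          (if pos = (j - 1) / 2 then x else heap.getD ((j - 1) / 2) (0, 0)) = false := by
      intro j hj0 hjl hjne
      have h := hInv j hj0 hjl hjne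
      rwa [pvGetD_set1 _ _ _ _ hp, pvGetD_set1 _ _ _ _ hp] at h
    apply ih rfl
    · simpa using hppl
    · -- Inv for (heap.set pos parent, parentpos, x)
      intro j hj0 hjl hjne
      simp only [List.length_set] at hjl
      rw [pvGetD_set2 _ _ _ _ _ _ hp hppl, pvGetD_set2 _ _ _ _ _ _ hp hppl]
      by_cases hj : pos = j
      · rw [if_neg (by omega), if_pos (by omega), if_pos (by omega)]
        exact pvPlt_to_ple hlt
      · rw [if_neg (by omega), if_neg hj]
        by_cases hc : (j - 1) / 2 = pos
        · rw [if_neg (by omega), if_pos (by omega)]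
          rw [hpardef, hppdef]
          exact hI2 j hj0 hjl hc hpos0
        · by_cases hpp2 : (j - 1) / 2 = pp
          · rw [if_pos (by omega)]
            have h := hInv' j hj0 hjl (by omega)
            rw [if_neg hj, if_neg (by omega), hpp2, ← hpardef] at h
            exact pvPle_trans (pvPlt_to_ple hlt) h
          · rw [if_neg (by omega), if_neg (by omega)]
            have h := hInv' j hj0 hjl (by omega)
            rwa [if_neg hj, if_neg (by omega)] at h
    · -- I2 for (heap.set pos parent, parentpos)
      intro j hj0 hjl hjpp hpp0
      simp only [List.length_set] at hjl
      rw [pvGetD_set1 _ _ _ _ hp, pvGetD_set1 _ _ _ _ hp]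
      rw [if_neg (by omega : ¬ pos = (pp - 1) / 2)]
      have hmid := hInv' pp (by omega) hppl (by omega)
      rw [if_neg (by omega), if_neg (by omega), ← hpardef] at hmid
      by_cases hj : pos = j
      · rw [if_pos hj]
        exact hmid
      · rw [if_neg hj]
        have h := hInv' j hj0 hjl (by omega)
        rw [if_neg hj, hjpp, if_neg (by omega), ← hpardef] at h
        exact pvPle_trans hmid h
  | case2 heap pos hsp pp par hlt =>
    intro hs hp hInv hI2
    subst hs
    have hppdef : pp = (pos - 1) / 2 := rfl
    have hpardef : par = heap.getD pp (0, 0) := rfl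
    intro j hj0 hjl
    simp only [List.length_set] at hjl
    by_cases hj : j = pos
    · subst hj
      rw [pvGetD_set1 _ _ _ _ hp, pvGetD_set1 _ _ _ _ hp, if_pos rfl,
        if_neg (by omega : ¬ j = (j - 1) / 2)]
      have : pvPlt x par = false := by simpa using hlt
      rw [hpardef, hppdef] at this
      exact this
    · exact hInv j hj0 hjl hj
  | case3 heap pos hsp =>
    intro hs hp hInv hI2
    subst hs
    have hpos : pos = 0 := by omega
    subst hpos
    intro j hj0 hjl
    simp only [List.length_set] at hjl
    exact hInv j hj0 hjl (by omega)

theorem pvSiftupLoop_spec (endpos : Nat) (newitem : Int × Int) :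
    ∀ (heap : List (Int × Int)) (pos childpos : Nat),
    heap.length = endpos → pos < endpos → childpos = 2 * pos + 1 →
    (∀ j, 0 < j → j < endpos → j ≠ pos → (j - 1) / 2 ≠ pos →
      pvPlt (heap.getD j (0, 0)) (heap.getD ((j - 1) / 2) (0, 0)) = false) →
    (∀ j, 0 < j → j < endpos → (j - 1) / 2 = pos → 0 < pos →
      pvPlt (heap.getD j (0, 0)) (heap.getD ((pos - 1) / 2) (0, 0)) = false) →
    ((pvSiftupLoop heap pos childpos endpos newitem).1.length = endpos ∧
     (pvSiftupLoop heap pos childpos endpos newitem).2 < endpos ∧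
     (pvSiftupLoop heap pos childpos endpos newitem).1.getD
        (pvSiftupLoop heap pos childpos endpos newitem).2 (0, 0) = newitem ∧
     (∀ y, (pvSiftupLoop heap pos childpos endpos newitem).1.count y +
        (if heap.getD pos (0, 0) = y then 1 else 0)
        = heap.count y + (if newitem = y then 1 else 0)) ∧
     (∀ j, 0 < j → j < endpos → j ≠ (pvSiftupLoop heap pos childpos endpos newitem).2 →
       pvPlt ((pvSiftupLoop heap pos childpos endpos newitem).1.getD j (0, 0))
         ((pvSiftupLoop heap pos childpos endpos newitem).1.getD ((j - 1) / 2) (0, 0)) = false) ∧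
     (∀ j, 0 < j → j < endpos →
       (j - 1) / 2 = (pvSiftupLoop heap pos childpos endpos newitem).2 → False)) := by
  intro heap pos childpos
  fun_induction pvSiftupLoop heap pos childpos endpos newitem with
  | case1 heap pos childpos hce rp c2 heap' ih =>
    intro hlen hp hcp J1 J2
    have hrp : rp = childpos + 1 := rfl
    have hc2def : c2 = if rp < endpos &&
        !pvPlt (heap.getD childpos (0, 0)) (heap.getD rp (0, 0)) then rp else childpos := rfl
    have hhdef : heap' = heap.set pos (heap.getD c2 (0, 0)) := rfl
    have hc2cases : (c2 = childpos ∧ (rp < endpos →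
        pvPlt (heap.getD rp (0, 0)) (heap.getD childpos (0, 0)) = false)) ∨
        (c2 = rp ∧ rp < endpos ∧
        pvPlt (heap.getD childpos (0, 0)) (heap.getD rp (0, 0)) = false) := by
      cases hb : (decide (rp < endpos) && !pvPlt (heap.getD childpos (0, 0)) (heap.getD rp (0, 0))) with
      | false =>
        left
        have hcne : ¬ ((decide (rp < endpos) &&
            !pvPlt (heap.getD childpos (0, 0)) (heap.getD rp (0, 0))) = true) := by
          intro hc; rw [hc] at hb; simp at hb
        have he : c2 = childpos := by rw [hc2def, if_neg hcne]
        refine ⟨he, ?_⟩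
        intro hrl
        by_cases hplt : pvPlt (heap.getD childpos (0, 0)) (heap.getD rp (0, 0)) = true
        · exact pvPlt_to_ple hplt
        · exfalso
          have hplt' : pvPlt (heap.getD childpos (0, 0)) (heap.getD rp (0, 0)) = false := by
            simpa using hplt
          rw [hplt'] at hb
          simp [hrl] at hb
      | true =>
        right
        have he : c2 = rp := by rw [hc2def, if_pos hb]
        rw [Bool.and_eq_true] at hb
        refine ⟨he, by simpa using hb.1, by simpa using hb.2⟩
    have hc2b : childpos ≤ c2 ∧ c2 ≤ rp := by rcases hc2cases with ⟨h, _⟩ | ⟨h, _⟩ <;> omega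
    have hc2lt : c2 < endpos := by rcases hc2cases with ⟨h, _⟩ | ⟨h, hl, _⟩ <;> omega
    have hchild : (c2 - 1) / 2 = pos := by omega
    have hplen : pos < heap.length := by omega
    have hsib : ∀ j, 0 < j → j < endpos → (j - 1) / 2 = pos → j ≠ c2 →
        pvPlt (heap.getD j (0, 0)) (heap.getD c2 (0, 0)) = false := by
      intro j hj0 hjl hjp hjne
      rcases hc2cases with ⟨he, hf⟩ | ⟨he, hrl, hf⟩
      · have hj : j = rp := by omega
        rw [he, hj]
        exact hf (by omega)
      · have hj : j = childpos := by omega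
        rw [he, hj]
        exact hf
    have hB : ∀ q, heap'.getD q (0, 0) =
        if pos = q then heap.getD c2 (0, 0) else heap.getD q (0, 0) := by
      intro q; rw [hhdef, pvGetD_set1 _ _ _ _ hplen]
    obtain ⟨L, P2, GD, CNT, E, F⟩ := ih (by rw [hhdef]; simpa using hlen) hc2lt rfl
      (by -- J1'
        intro j hj0 hjl hne1 hne2
        rw [hB, hB]
        by_cases hjpos : pos = j
        · rw [if_pos hjpos, if_neg (by omega)]
          subst hjpos
          exact J2 c2 (by omega) hc2lt hchild hj0
        · rw [if_neg hjpos]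
          by_cases hjp : (j - 1) / 2 = pos
          · rw [if_pos (by omega)]
            exact hsib j hj0 hjl hjp hne1
          · rw [if_neg (by omega)]
            exact J1 j hj0 hjl (by omega) (by omega))
      (by -- J2'
        intro j hj0 hjl hjc hc0
        rw [hB, hB]
        rw [if_neg (by omega : ¬ pos = j), if_pos (by omega : pos = (c2 - 1) / 2)]
        have h := J1 j hj0 hjl (by omega) (by omega)
        rwa [hjc] at h)
    refine ⟨L, P2, GD, ?_, E, F⟩
    intro y
    have h1 := CNT y
    have h2 := pvCount_set heap pos (heap.getD c2 (0, 0)) y hplen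
    rw [hB, if_neg (by omega : ¬ pos = c2)] at h1
    rw [← hhdef] at h2
    split_ifs at h1 h2 ⊢ <;> omega
  | case2 heap pos childpos hce =>
    intro hlen hp hcp J1 J2
    have hplen : pos < heap.length := by omega
    refine ⟨by simp [hlen], hp, ?_, ?_, ?_, ?_⟩
    · rw [pvGetD_set1 _ _ _ _ hplen, if_pos rfl]
    · intro y; exact pvCount_set heap pos newitem y hplen
    · intro j hj0 hjl hne
      rw [pvGetD_set1 _ _ _ _ hplen, pvGetD_set1 _ _ _ _ hplen,
        if_neg (by omega : ¬ pos = j), if_neg (by omega : ¬ pos = (j - 1) / 2)]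
      exact J1 j hj0 hjl (by omega) (by omega)
    · intro j hj0 hjl hjp
      omega

theorem pvHeapreplace_spec (heap : List (Int × Int)) (x : Int × Int) (hh : PvHeap heap)
    (hne : heap ≠ []) :
    PvHeap (pvHeapreplace heap x) ∧ (pvHeapreplace heap x).length = heap.length ∧
    (∀ y, (pvHeapreplace heap x).count y + (if heap.getD 0 (0, 0) = y then 1 else 0)
      = heap.count y + (if x = y then 1 else 0)) := by
  have h0 : 0 < heap.length := List.length_pos_of_ne_nil hne
  have hnew : (heap.set 0 x).getD 0 (0, 0) = x := by
    rw [pvGetD_set1 _ _ _ _ h0, if_pos rfl]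
  have hlen : (heap.set 0 x).length = heap.length := by simp
  obtain ⟨L, P2, GD, CNT, E, F⟩ := pvSiftupLoop_spec heap.length x (heap.set 0 x) 0 (2 * 0 + 1)
    hlen h0 rfl
    (by
      intro j hj0 hjl _ hpne
      rw [pvGetD_set1 _ _ _ _ h0, pvGetD_set1 _ _ _ _ h0,
        if_neg (by omega : ¬ (0 : Nat) = j), if_neg (by omega : ¬ (0 : Nat) = (j - 1) / 2)]
      exact hh j hj0 hjl)
    (by intro j _ _ _ h; omega)
  rw [hnew] at CNT
  have hrepl : pvHeapreplace heap x
      = pvSiftdownLoop (pvSiftupLoop (heap.set 0 x) 0 (2 * 0 + 1) heap.length x).1 0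
        (pvSiftupLoop (heap.set 0 x) 0 (2 * 0 + 1) heap.length x).2
        ((pvSiftupLoop (heap.set 0 x) 0 (2 * 0 + 1) heap.length x).1.getD
          (pvSiftupLoop (heap.set 0 x) 0 (2 * 0 + 1) heap.length x).2 (0, 0)) := by
    simp only [pvHeapreplace, pvSiftup, pvSiftdown, hlen, hnew]
  have hr2 : (pvSiftupLoop (heap.set 0 x) 0 (2 * 0 + 1) heap.length x).2
      < (pvSiftupLoop (heap.set 0 x) 0 (2 * 0 + 1) heap.length x).1.length := by omega
  have hsetid : (pvSiftupLoop (heap.set 0 x) 0 (2 * 0 + 1) heap.length x).1.set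
      (pvSiftupLoop (heap.set 0 x) 0 (2 * 0 + 1) heap.length x).2 x
      = (pvSiftupLoop (heap.set 0 x) 0 (2 * 0 + 1) heap.length x).1 := by
    have h := pvSet_getD_self (pvSiftupLoop (heap.set 0 x) 0 (2 * 0 + 1) heap.length x).1
      (pvSiftupLoop (heap.set 0 x) 0 (2 * 0 + 1) heap.length x).2 hr2
    rwa [GD] at h
  rw [hrepl, GD]
  refine ⟨?_, ?_, ?_⟩
  · apply pvSiftdownLoop_heap _ 0 _ _ rfl hr2
    · intro j hj0 hjl hjne
      rw [hsetid]
      rw [L] at hjl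
      exact E j hj0 hjl hjne
    · intro j hj0 hjl hjp _
      rw [L] at hjl
      exact absurd hjp (by intro hc; exact F j hj0 hjl hc)
  · rw [pvSiftdownLoop_length, L]
  · intro y
    have h1 := pvSiftdownLoop_count _ 0 _ x y hr2
    rw [GD] at h1
    have h2 := CNT y
    have h3 := pvCount_set heap 0 x y h0
    split_ifs at h1 h2 h3 ⊢ <;> omega

theorem pvHeappush_spec (heap : List (Int × Int)) (x : Int × Int) (hh : PvHeap heap) :
    PvHeap (pvHeappush heap x) ∧ (pvHeappush heap x).length = heap.length + 1 ∧
    (∀ y, (pvHeappush heap x).count y = heap.count y + (if x = y then 1 else 0)) := by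
  have hget : (heap ++ [x]).getD heap.length (0, 0) = x := by
    simp [List.getD_eq_getElem?_getD, List.getElem?_append_right]
  have hleft : ∀ j, j < heap.length → (heap ++ [x]).getD j (0, 0) = heap.getD j (0, 0) := by
    intro j hj
    simp [List.getD_eq_getElem?_getD, List.getElem?_append_left hj]
  have hlen1 : (heap ++ [x]).length = heap.length + 1 := by simp
  have hpush : pvHeappush heap x
      = pvSiftdownLoop (heap ++ [x]) 0 heap.length x := by
    simp only [pvHeappush, pvSiftdown, hlen1, Nat.add_sub_cancel, hget]
  have hplt : heap.length < (heap ++ [x]).length := by simp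
  have hsetid : (heap ++ [x]).set heap.length x = heap ++ [x] := by
    have h := pvSet_getD_self (heap ++ [x]) heap.length hplt
    rwa [hget] at h
  rw [hpush]
  refine ⟨?_, ?_, ?_⟩
  · apply pvSiftdownLoop_heap _ 0 _ _ rfl hplt
    · intro j hj0 hjl hjne
      rw [hsetid]
      rw [hlen1] at hjl
      have hjlt : j < heap.length := by omega
      have hplt2 : (j - 1) / 2 < heap.length := by omega
      rw [hleft j hjlt, hleft _ hplt2]
      exact hh j hj0 hjlt
    · intro j hj0 hjl hjp _
      rw [hlen1] at hjl
      omega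
  · rw [pvSiftdownLoop_length, hlen1]
  · intro y
    have h1 := pvSiftdownLoop_count (heap ++ [x]) 0 heap.length x y hplt
    rw [hget] at h1
    have h2 : (heap ++ [x]).count y = heap.count y + (if x = y then 1 else 0) := by
      rw [List.count_append]
      by_cases hxy : x = y <;> simp [List.count_singleton, hxy, eq_comm]
    split_ifs at h1 h2 ⊢ <;> omega

def pvPairs (nums : List Int) : List (Int × Int) :=
  nums.zipIdx.map (fun p => (p.1, (p.2 : Int)))

theorem pvPairs_length (nums : List Int) : (pvPairs nums).length = nums.length := by
  simp [pvPairs]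

theorem pvPairs_getElem? (nums : List Int) (j : Nat) :
    (pvPairs nums)[j]? = nums[j]?.map (fun a => (a, (j : Int))) := by
  simp [pvPairs]
  cases nums[j]? <;> rfl

theorem pvPairs_getD (nums : List Int) (j : Nat) (hj : j < nums.length) :
    (pvPairs nums).getD j (0, 0) = (nums.getD j 0, (j : Int)) := by
  simp [List.getD_eq_getElem?_getD, pvPairs_getElem?, List.getElem?_eq_getElem hj,
    List.getD_eq_getElem nums _ hj]

theorem pvPairs_mem {nums : List Int} {x : Int × Int} (hx : x ∈ pvPairs nums) :
    ∃ j, j < nums.length ∧ x = (nums.getD j 0, (j : Int)) := by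
  rw [List.mem_iff_getElem?] at hx
  obtain ⟨j, hj⟩ := hx
  rw [pvPairs_getElem?] at hj
  cases hn : nums[j]? with
  | none => rw [hn] at hj; simp at hj
  | some v =>
    rw [hn] at hj
    simp at hj
    have hjl : j < nums.length := by
      by_contra hc
      rw [List.getElem?_eq_none (by omega)] at hn
      simp at hn
    refine ⟨j, hjl, ?_⟩
    rw [List.getD_eq_getElem nums _ hjl]
    have : nums[j] = v := by
      have := List.getElem?_eq_getElem hjl
      rw [hn] at this
      simpa using this.symm
    rw [this, ← hj]

theorem pvPairs_set (nums : List Int) (p : Nat) (v : Int) (hp : p < nums.length) :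
    pvPairs (nums.set p v) = (pvPairs nums).set p (v, (p : Int)) := by
  apply List.ext_getElem?
  intro j
  rw [pvPairs_getElem?, List.getElem?_set, List.getElem?_set, pvPairs_getElem?]
  by_cases hpj : p = j <;> simp [hpj, pvPairs_length, hp]

theorem pvBuild_spec (nums : List Int) :
    PvHeap (pvBuild nums) ∧ (pvBuild nums).length = nums.length ∧
    (∀ y, (pvBuild nums).count y = (pvPairs nums).count y) := by
  have key : ∀ i, i ≤ nums.length →
      PvHeap ((List.range i).foldl (fun h j => pvHeappush h (nums.getD j 0, (j : Int))) []) ∧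
      ((List.range i).foldl (fun h j => pvHeappush h (nums.getD j 0, (j : Int))) []).length = i ∧
      (∀ y, ((List.range i).foldl (fun h j => pvHeappush h (nums.getD j 0, (j : Int))) []).count y
        = ((pvPairs nums).take i).count y) := by
    intro i
    induction i with
    | zero =>
      intro _
      refine ⟨?_, rfl, ?_⟩
      · intro j hj0 hjl; simp at hjl
      · intro y; simp
    | succ n ih =>
      intro hle
      obtain ⟨h1, h2, h3⟩ := ih (by omega)
      rw [List.range_succ, List.foldl_append, List.foldl_cons, List.foldl_nil]
      obtain ⟨p1, p2, p3⟩ := pvHeappush_spec _ (nums.getD n 0, (n : Int)) h1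
      refine ⟨p1, by rw [p2, h2], ?_⟩
      intro y
      rw [p3, h3]
      have hnn : n < nums.length := by omega
      have hgp : (pvPairs nums)[n]? = some (nums.getD n 0, (n : Int)) := by
        rw [pvPairs_getElem?, List.getElem?_eq_getElem hnn, List.getD_eq_getElem nums _ hnn]
        rfl
      have hsing : List.count y [(nums.getD n 0, (n : Int))]
          = if (nums.getD n 0, (n : Int)) = y then 1 else 0 := by
        by_cases h : (nums.getD n 0, (n : Int)) = y
        · rw [h]; simp
        · rw [if_neg h]
          simp only [List.count_singleton, beq_iff_eq]
          rw [if_neg h]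
      rw [List.take_succ, hgp]
      simp only [Option.toList_some]
      rw [List.count_append, hsing]
  obtain ⟨h1, h2, h3⟩ := key nums.length le_rfl
  refine ⟨h1, h2, ?_⟩
  intro y
  have htl : List.take nums.length (pvPairs nums) = pvPairs nums := by
    rw [← pvPairs_length nums]
    exact List.take_length
  unfold pvBuild
  rw [h3 y, htl]

theorem pvLoop_eq (multiplier : Int) :
    ∀ fuel (nums : List Int) (heap : List (Int × Int)), nums ≠ [] → PvHeap heap →
    heap.length = nums.length →
    (∀ y, heap.count y = (pvPairs nums).count y) →
    (pvLoopA multiplier fuel (nums, heap)).1 = pvLoopB multiplier fuel nums := by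
  intro fuel
  induction fuel with
  | zero => intro nums heap _ _ _ _; rfl
  | succ f ih =>
    intro nums heap hne hh hlen hcnt
    have h0 : 0 < nums.length := List.length_pos_of_ne_nil hne
    have hhne : heap ≠ [] := by
      intro hc; rw [hc] at hlen; simp at hlen; omega
    -- B-side: the minimum and its first index
    obtain ⟨m, hm⟩ : ∃ m, PySem.List.min? nums (fun x => x) = some m := by
      cases hmo : PySem.List.min? nums (fun x => x) with
      | none => exact absurd (Iff.mp (PySem.List.min?_eq_none_iff nums (fun x => x)) hmo) hne
      | some m => exact ⟨m, rfl⟩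
    have hmmem : m ∈ nums := PySem.List.min?_mem hm
    have hmmin : ∀ v ∈ nums, m ≤ v := by
      intro v hv
      exact PySem.List.min?_isMin hm v hv
    obtain ⟨k, hk⟩ : ∃ k, PySem.List.index? nums m = some k := by
      have := (PySem.List.index?_isSome_iff (xs := nums) (v := m)).mpr hmmem
      cases hio : PySem.List.index? nums m with
      | none => rw [hio] at this; simp at this
      | some k => exact ⟨k, rfl⟩
    obtain ⟨hkl, hkv, hkfirst⟩ := PySem.List.getElem_of_index?_eq_some hk
    -- the heap root is (m, k)
    have hroot_mem : heap.getD 0 (0, 0) ∈ heap := by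
      cases heap with
      | nil => exact absurd rfl hhne
      | cons a t => simp [List.getD_cons_zero]
    have hmemiff : ∀ z : Int × Int, z ∈ heap ↔ z ∈ pvPairs nums := by
      intro z
      rw [← List.count_pos_iff (l := heap), ← List.count_pos_iff (l := pvPairs nums), hcnt]
    have htmem : (m, (k : Int)) ∈ pvPairs nums := by
      have : (pvPairs nums)[k]? = some (m, (k : Int)) := by
        rw [pvPairs_getElem?, List.getElem?_eq_getElem hkl]
        simp [List.getD_eq_getElem nums _ hkl, hkv]
      exact List.mem_of_getElem? this
    have htmin : ∀ x ∈ pvPairs nums, pvPlt x (m, (k : Int)) = false := by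
      intro x hx
      obtain ⟨j, hjl, hjx⟩ := pvPairs_mem hx
      subst hjx
      have hgd : nums.getD j 0 = nums[j] := List.getD_eq_getElem nums _ hjl
      have hmv : m ≤ nums[j] := hmmin _ (List.getElem_mem hjl)
      rw [pvPlt_false_iff]
      dsimp only
      rw [hgd]
      by_cases heq : nums[j] = m
      · have hkj : k ≤ j := by
          by_contra hc
          exact hkfirst j (by omega) heq
        right
        exact ⟨heq.symm, by exact_mod_cast hkj⟩
      · left; omega
    have hrmin : ∀ x ∈ heap, pvPlt x (heap.getD 0 (0, 0)) = false := by
      intro x hx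
      obtain ⟨idx, hidx, hxe⟩ := List.mem_iff_getElem.mp hx
      rw [← hxe, ← List.getD_eq_getElem heap _ hidx]
      exact pvHeap_root_min hh idx hidx
    have hr1 : pvPlt (heap.getD 0 (0, 0)) (m, (k : Int)) = false :=
      htmin _ ((hmemiff _).mp hroot_mem)
    have hr2 : pvPlt (m, (k : Int)) (heap.getD 0 (0, 0)) = false :=
      hrmin _ ((hmemiff _).mpr htmem)
    have hroot : heap.getD 0 (0, 0) = (m, (k : Int)) := pvPle_antisymm hr1 hr2
    have hstepA : pvLoopA multiplier (f + 1) (nums, heap)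
        = pvLoopA multiplier f (nums.set k (m * multiplier),
            pvHeapreplace heap (m * multiplier, (k : Int))) := by
      simp only [pvLoopA]
      rw [hroot]
      simp
    have hstepB : pvLoopB multiplier (f + 1) nums
        = pvLoopB multiplier f (nums.set k (m * multiplier)) := by
      simp only [pvLoopB, hm, hk, Option.getD_some]
    rw [hstepA, hstepB]
    obtain ⟨q1, q2, q3⟩ := pvHeapreplace_spec heap (m * multiplier, (k : Int)) hh hhne
    apply ih
    · have hls : (nums.set k (m * multiplier)).length = nums.length := by simp
      intro hc
      rw [hc] at hls
      simp at hls
      omega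
    · exact q1
    · rw [q2, hlen]; simp
    · intro y
      have h1 := q3 y
      rw [hroot] at h1
      have h2 := pvCount_set (pvPairs nums) k (m * multiplier, (k : Int)) y
        (by rw [pvPairs_length]; exact hkl)
      rw [pvPairs_getD nums k hkl] at h2
      have hgdk : nums.getD k 0 = m := by rw [List.getD_eq_getElem nums _ hkl, hkv]
      rw [hgdk] at h2
      rw [pvPairs_set nums k (m * multiplier) hkl]
      have h3 := hcnt y
      split_ifs at h1 h2 ⊢ <;> omega

-- ===== VERDICT (by name: the statement is the Claim_ definition above) =====
theorem get_final_state_heap_spec : Claim_equal_get_final_state_heap := by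
  unfold Claim_equal_get_final_state_heap
  intro nums k multiplier _dom pre
  unfold Spec_get_final_state_heap get_final_state_heap get_final_state_heap_alt
  rcases Nat.eq_zero_or_pos k.toNat with h0 | hpos
  · simp [h0, pvLoopA, pvLoopB]
  · have hne : nums ≠ [] := by
      rcases pre with h | h
      · exact h
      · exfalso; omega
    obtain ⟨h1, h2, h3⟩ := pvBuild_spec nums
    exact pvLoop_eq multiplier k.toNat nums (pvBuild nums) hne h1 h2 h3
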